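-- pv_equiv track=rewrite | github.com/ghodkesriyash/Python-Programming | Assignments/Dictionary_advanced.py | bin_fruits
-- ===== SOURCE A (Python) =====
-- def bin_fruits(fruit_prices: dict) -> dict:
--     """Classify fruits into cheap / affordable / costly based on price."""
--     binned_fruits = {"cheap": set(), "affordable": set(), "costly": set()}
--     for fruit, price in fruit_prices.items():
--         if price < 3:
--             binned_fruits["cheap"].add(fruit)
--         elif price <= 6:                        # already know price >= 3
--             binned_fruits["affordable"].add(fruit)
--         else:
--             binned_fruits["costly"].add(fruit)
--     return binned_fruits
-- ===== SOURCE B (Python) =====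
-- def bin_fruits(fruit_prices: dict) -> dict:
--     """Classify fruits into cheap / affordable / costly based on price."""
--     items = fruit_prices.items()
--     return {
--         "cheap": {f for f, p in items if p < 3},
--         "affordable": {f for f, p in items if 3 <= p <= 6},
--         "costly": {f for f, p in items if p > 6},
--     }
-- ===== Notes on version B (the rewrite author's own statement) =====
-- stated objective: idiomatic
-- what changed: Replaces the single branching loop that mutates three pre-created sets with three independent set comprehensions over items(), one filtering pass per price bin, assembled directly into the returned dict.
import Mathlib
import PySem

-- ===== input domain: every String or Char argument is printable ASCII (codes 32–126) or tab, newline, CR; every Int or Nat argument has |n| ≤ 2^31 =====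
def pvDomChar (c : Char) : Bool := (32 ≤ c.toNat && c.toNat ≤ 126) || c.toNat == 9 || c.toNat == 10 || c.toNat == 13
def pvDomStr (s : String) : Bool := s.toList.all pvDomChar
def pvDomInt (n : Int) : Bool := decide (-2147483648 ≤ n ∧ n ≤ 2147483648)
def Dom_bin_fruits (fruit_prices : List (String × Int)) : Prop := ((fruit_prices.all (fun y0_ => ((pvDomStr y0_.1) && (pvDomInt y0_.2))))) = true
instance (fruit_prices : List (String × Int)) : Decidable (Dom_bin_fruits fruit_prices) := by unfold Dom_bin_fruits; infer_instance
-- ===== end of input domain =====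

-- B replaces A's single branching loop mutating three sets with three independent
-- set-comprehension filtering passes over the items (idiomatic; same O(n) cost).

-- ===== PORT A =====
-- A: one pass over items, adding each fruit to one of three sets held in the bins dict.
def bin_fruits (fruit_prices : List (String × Int)) : List (String × List String) :=
  let bins :=
    fruit_prices.foldl
      (fun (b : PySem.Set String × PySem.Set String × PySem.Set String) fp =>
        if fp.2 < 3 then (PySem.Set.add b.1 fp.1, b.2.1, b.2.2)
        else if fp.2 ≤ 6 then (b.1, PySem.Set.add b.2.1 fp.1, b.2.2)
        else (b.1, b.2.1, PySem.Set.add b.2.2 fp.1))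
      (PySem.Set.empty, PySem.Set.empty, PySem.Set.empty)
  match bins with
  | (cheap, affordable, costly) =>
      [("cheap", cheap), ("affordable", affordable), ("costly", costly)]

-- ===== PORT B =====
-- B: each bin is its own set comprehension {f for f,p in items if <cond>}.
def bin_fruits_alt (fruit_prices : List (String × Int)) : List (String × List String) :=
  [("cheap",
      PySem.Set.ofList ((fruit_prices.filter (fun fp => decide (fp.2 < 3))).map Prod.fst)),
   ("affordable",
      PySem.Set.ofList ((fruit_prices.filter (fun fp => decide (3 ≤ fp.2) && decide (fp.2 ≤ 6))).map Prod.fst)),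
   ("costly",
      PySem.Set.ofList ((fruit_prices.filter (fun fp => decide (6 < fp.2))).map Prod.fst))]

-- ===== PRECONDITION & SPEC =====
def Spec_bin_fruits (fruit_prices : List (String × Int)) (out : List (String × List String)) : Prop := out = bin_fruits_alt fruit_prices
instance (fruit_prices : List (String × Int)) (out : List (String × List String)) : Decidable (Spec_bin_fruits fruit_prices out) := by unfold Spec_bin_fruits; infer_instance

-- ===== CLAIM (what is proved, stated in full; the proofs are below) =====
def Claim_equal_bin_fruits : Prop := ∀ (fruit_prices : List (String × Int)), Dom_bin_fruits fruit_prices → Spec_bin_fruits fruit_prices (bin_fruits fruit_prices)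

-- ===== LEMMAS AND PROOFS =====

-- A's fold from arbitrary accumulators updates each set with the fruits of its bin, in order.
theorem bin_fruits_foldl_eq (l : List (String × Int))
    (c a k : PySem.Set String) :
    l.foldl
      (fun (b : PySem.Set String × PySem.Set String × PySem.Set String) fp =>
        if fp.2 < 3 then (PySem.Set.add b.1 fp.1, b.2.1, b.2.2)
        else if fp.2 ≤ 6 then (b.1, PySem.Set.add b.2.1 fp.1, b.2.2)
        else (b.1, b.2.1, PySem.Set.add b.2.2 fp.1))
      (c, a, k)
    = (PySem.Set.update c ((l.filter (fun fp => decide (fp.2 < 3))).map Prod.fst),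
       PySem.Set.update a ((l.filter (fun fp => decide (3 ≤ fp.2) && decide (fp.2 ≤ 6))).map Prod.fst),
       PySem.Set.update k ((l.filter (fun fp => decide (6 < fp.2))).map Prod.fst)) := by
  induction l generalizing c a k with
  | nil => rfl
  | cons hd tl ih =>
    simp only [List.foldl_cons, List.filter_cons]
    by_cases h1 : hd.2 < 3
    · simp [h1, ih, PySem.Set.update, show ¬ (3 ≤ hd.2) by omega, show ¬ (6 < hd.2) by omega]
    · by_cases h2 : hd.2 ≤ 6
      · simp [h1, h2, ih, PySem.Set.update, show 3 ≤ hd.2 by omega, show ¬ (6 < hd.2) by omega]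
      · simp [h1, h2, ih, PySem.Set.update, show 6 < hd.2 by omega]

-- ===== VERDICT (by name: the statement is the Claim_ definition above) =====
theorem bin_fruits_spec : Claim_equal_bin_fruits := by
  intro fp _
  show bin_fruits fp = bin_fruits_alt fp
  simp only [bin_fruits, bin_fruits_alt, bin_fruits_foldl_eq]
  rfl
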